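-- pv_equiv track=rewrite | github.com/FrancescoSRende/Year-11-Coding | Year 11 Coding/Tools/originalTools.py | hexToBase2
-- ===== SOURCE A (Python) =====
-- def hexToBase2(s):
--
--     #parallel lists
--     HEX = ['0','1','2','3','4','5','6','7','8','9','A','B','C','D','E','F']
--     BIN = ['0000','0001','0010','0011','0100','0101','0110','0111','1000','1001','1010','1011','1100','1101','1110','1111']
--
--     result = ""
--
--
--     for n in range(0,len(s),1):
--         for i in range(0,len(HEX),1):
--             if HEX[i] == s[n]:
--                 result = result + BIN[i] + " "
--                 break #this means that once we find one result, we break out of the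
--                 #most immediate loop structure
--
--
--     '''for n in range(len(s),-1,-1):
--         for i in range(0,len(HEX),1):
--             if HEX[i] == s[n]:
--                 result = BIN[i] + result'''
--     #the same loop as above but done in reverse
--
--     '''for i in range(0,len(result),1):
--         if (result == "0"):
--             return result
--         elif (result[i] == "1"):
--             return result[i:]'''
--     #optional code to remove beginning zeros
--
--     return result
-- ===== SOURCE B (Python) =====
-- def hexToBase2(s):
--     # one pass, direct arithmetic on character codes instead of parallel lookup tables
--     parts = []
--     for c in s:
--         if '0' <= c <= '9':
--             v = ord(c) - 48
--         elif 'A' <= c <= 'F':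
--             v = ord(c) - 55
--         else:
--             continue
--         parts.append(format(v, '04b') + ' ')
--     return ''.join(parts)
-- ===== Notes on version B (the rewrite author's own statement) =====
-- stated objective: idiomatic
-- what changed: Replaces A's parallel HEX/BIN lookup tables with their inner linear search loop by a single pass that computes each nibble directly from the character code (ord arithmetic and bit formatting), collecting pieces in a list joined once.
import Mathlib
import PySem

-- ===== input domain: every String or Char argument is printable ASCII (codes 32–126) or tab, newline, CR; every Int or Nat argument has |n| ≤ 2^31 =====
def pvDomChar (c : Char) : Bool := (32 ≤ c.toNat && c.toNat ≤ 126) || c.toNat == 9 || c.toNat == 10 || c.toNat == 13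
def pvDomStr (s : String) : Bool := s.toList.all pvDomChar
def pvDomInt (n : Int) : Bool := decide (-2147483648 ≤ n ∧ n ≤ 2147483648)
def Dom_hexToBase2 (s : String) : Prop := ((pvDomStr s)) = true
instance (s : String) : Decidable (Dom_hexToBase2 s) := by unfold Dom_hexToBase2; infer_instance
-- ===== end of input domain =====

-- B replaces A's parallel HEX/BIN lookup tables and inner search loop by direct
-- character-code arithmetic computing each nibble (idiomatic; return value only).

-- ===== PORT A =====
-- inner loop of A: scan the parallel lists HEX/BIN in index order, return the
-- first BIN entry whose HEX entry equals the character (the `break`), none otherwise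
def hexToBase2_inner (c : Char) : List Char → List String → Option String
  | h :: hs, b :: bs => if h == c then some b else hexToBase2_inner c hs bs
  | _, _ => none

def hexToBase2_HEX : List Char :=
  ['0','1','2','3','4','5','6','7','8','9','A','B','C','D','E','F']
def hexToBase2_BIN : List String :=
  ["0000","0001","0010","0011","0100","0101","0110","0111",
   "1000","1001","1010","1011","1100","1101","1110","1111"]

-- outer loop of A: over the characters of s in order, accumulating result
def hexToBase2_go (result : String) : List Char → String
  | [] => result
  | c :: rest =>
    match hexToBase2_inner c hexToBase2_HEX hexToBase2_BIN with
    | some b => hexToBase2_go (result ++ b ++ " ") rest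
    | none => hexToBase2_go result rest

def hexToBase2 (s : String) : String := hexToBase2_go "" s.toList

-- ===== PORT B =====
-- value of an uppercase-hex digit by character-code arithmetic (B's if/elif/continue)
def hexToBase2_val? (c : Char) : Option Nat :=
  if '0' ≤ c ∧ c ≤ '9' then some (c.toNat - 48)
  else if 'A' ≤ c ∧ c ≤ 'F' then some (c.toNat - 55)
  else none

-- format(v, '04b')
def hexToBase2_nibble (v : Nat) : String :=
  String.ofList [if v / 8 % 2 = 1 then '1' else '0',
             if v / 4 % 2 = 1 then '1' else '0',
             if v / 2 % 2 = 1 then '1' else '0',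
             if v % 2 = 1 then '1' else '0']

-- loop body of B: the appended piece for one character (none = `continue`)
def hexToBase2_step (c : Char) : Option String :=
  (hexToBase2_val? c).map (fun v => hexToBase2_nibble v ++ " ")

def hexToBase2_alt (s : String) : String :=
  String.join (s.toList.filterMap hexToBase2_step)

-- ===== PRECONDITION & SPEC =====
def Spec_hexToBase2 (s : String) (out : String) : Prop := out = hexToBase2_alt s
instance (s : String) (out : String) : Decidable (Spec_hexToBase2 s out) := by unfold Spec_hexToBase2; infer_instance

-- ===== CLAIM (what is proved, stated in full; the proofs are below) =====
def Claim_equal_hexToBase2 : Prop := ∀ (s : String), Dom_hexToBase2 s → Spec_hexToBase2 s (hexToBase2 s)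

-- ===== LEMMAS AND PROOFS =====

-- the per-character agreement of A's table search with B's arithmetic
theorem hexToBase2_inner_eq (c : Char) :
    hexToBase2_inner c hexToBase2_HEX hexToBase2_BIN
      = (hexToBase2_val? c).map hexToBase2_nibble := by
  by_cases h0 : c = '0'; · subst h0; decide
  by_cases h1 : c = '1'; · subst h1; decide
  by_cases h2 : c = '2'; · subst h2; decide
  by_cases h3 : c = '3'; · subst h3; decide
  by_cases h4 : c = '4'; · subst h4; decide
  by_cases h5 : c = '5'; · subst h5; decide
  by_cases h6 : c = '6'; · subst h6; decide
  by_cases h7 : c = '7'; · subst h7; decide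
  by_cases h8 : c = '8'; · subst h8; decide
  by_cases h9 : c = '9'; · subst h9; decide
  by_cases hA : c = 'A'; · subst hA; decide
  by_cases hB : c = 'B'; · subst hB; decide
  by_cases hC : c = 'C'; · subst hC; decide
  by_cases hD : c = 'D'; · subst hD; decide
  by_cases hE : c = 'E'; · subst hE; decide
  by_cases hF : c = 'F'; · subst hF; decide
  have left : hexToBase2_inner c hexToBase2_HEX hexToBase2_BIN = none := by
    simp only [hexToBase2_inner, hexToBase2_HEX, hexToBase2_BIN]
    simp [Ne.symm h0, Ne.symm h1, Ne.symm h2, Ne.symm h3, Ne.symm h4, Ne.symm h5,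
          Ne.symm h6, Ne.symm h7, Ne.symm h8, Ne.symm h9, Ne.symm hA, Ne.symm hB,
          Ne.symm hC, Ne.symm hD, Ne.symm hE, Ne.symm hF]
  have right : hexToBase2_val? c = none := by
    have hcv : c.toNat = c.val.toNat := rfl
    have n0 : c.val.toNat ≠ 48 := fun h => h0 (Char.ext (UInt32.toNat_inj.mp h))
    have n1 : c.val.toNat ≠ 49 := fun h => h1 (Char.ext (UInt32.toNat_inj.mp h))
    have n2 : c.val.toNat ≠ 50 := fun h => h2 (Char.ext (UInt32.toNat_inj.mp h))
    have n3 : c.val.toNat ≠ 51 := fun h => h3 (Char.ext (UInt32.toNat_inj.mp h))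
    have n4 : c.val.toNat ≠ 52 := fun h => h4 (Char.ext (UInt32.toNat_inj.mp h))
    have n5 : c.val.toNat ≠ 53 := fun h => h5 (Char.ext (UInt32.toNat_inj.mp h))
    have n6 : c.val.toNat ≠ 54 := fun h => h6 (Char.ext (UInt32.toNat_inj.mp h))
    have n7 : c.val.toNat ≠ 55 := fun h => h7 (Char.ext (UInt32.toNat_inj.mp h))
    have n8 : c.val.toNat ≠ 56 := fun h => h8 (Char.ext (UInt32.toNat_inj.mp h))
    have n9 : c.val.toNat ≠ 57 := fun h => h9 (Char.ext (UInt32.toNat_inj.mp h))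
    have nA : c.val.toNat ≠ 65 := fun h => hA (Char.ext (UInt32.toNat_inj.mp h))
    have nB : c.val.toNat ≠ 66 := fun h => hB (Char.ext (UInt32.toNat_inj.mp h))
    have nC : c.val.toNat ≠ 67 := fun h => hC (Char.ext (UInt32.toNat_inj.mp h))
    have nD : c.val.toNat ≠ 68 := fun h => hD (Char.ext (UInt32.toNat_inj.mp h))
    have nE : c.val.toNat ≠ 69 := fun h => hE (Char.ext (UInt32.toNat_inj.mp h))
    have nF : c.val.toNat ≠ 70 := fun h => hF (Char.ext (UInt32.toNat_inj.mp h))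
    unfold hexToBase2_val?
    rw [if_neg, if_neg]
    · rintro ⟨hl, hr⟩
      rw [Char.le_def, UInt32.le_iff_toNat_le] at hl hr
      have eA : ('A' : Char).val.toNat = 65 := rfl
      have eF : ('F' : Char).val.toNat = 70 := rfl
      omega
    · rintro ⟨hl, hr⟩
      rw [Char.le_def, UInt32.le_iff_toNat_le] at hl hr
      have e0 : ('0' : Char).val.toNat = 48 := rfl
      have e9 : ('9' : Char).val.toNat = 57 := rfl
      omega
  rw [left, right]; rfl

theorem hexToBase2_foldl_append (l : List String) : ∀ (a b : String),
    List.foldl (· ++ ·) (a ++ b) l = a ++ List.foldl (· ++ ·) b l := by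
  induction l with
  | nil => intro a b; rfl
  | cons c t ih =>
    intro a b
    show List.foldl (· ++ ·) (a ++ b ++ c) t = a ++ List.foldl (· ++ ·) (b ++ c) t
    rw [String.append_assoc, ih]

theorem hexToBase2_join_cons (a : String) (l : List String) :
    String.join (a :: l) = a ++ String.join l := by
  show List.foldl (· ++ ·) ("" ++ a) l = a ++ List.foldl (· ++ ·) "" l
  rw [String.empty_append, ← String.append_empty (s := a), hexToBase2_foldl_append,
      String.append_empty]

theorem hexToBase2_go_eq (l : List Char) : ∀ (r : String),
    hexToBase2_go r l = r ++ String.join (l.filterMap hexToBase2_step) := by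
  induction l with
  | nil =>
    intro r
    show r = r ++ String.join []
    rw [show String.join [] = "" from rfl, String.append_empty]
  | cons c t ih =>
    intro r
    rw [show hexToBase2_go r (c :: t)
          = (match hexToBase2_inner c hexToBase2_HEX hexToBase2_BIN with
             | some b => hexToBase2_go (r ++ b ++ " ") t
             | none => hexToBase2_go r t) from rfl,
        hexToBase2_inner_eq c]
    cases h : hexToBase2_val? c with
    | none =>
      have hstep : hexToBase2_step c = none := by rw [hexToBase2_step, h]; rfl
      show hexToBase2_go r t = _
      rw [List.filterMap_cons_none hstep]
      exact ih r
    | some v =>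
      have hstep : hexToBase2_step c = some (hexToBase2_nibble v ++ " ") := by
        rw [hexToBase2_step, h]; rfl
      show hexToBase2_go (r ++ hexToBase2_nibble v ++ " ") t = _
      rw [ih, List.filterMap_cons_some hstep, hexToBase2_join_cons]
      simp only [String.append_assoc]

-- ===== VERDICT (by name: the statement is the Claim_ definition above) =====
theorem hexToBase2_spec : Claim_equal_hexToBase2 := by
  intro s _
  show hexToBase2 s = hexToBase2_alt s
  rw [hexToBase2, hexToBase2_alt, hexToBase2_go_eq, String.empty_append]
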